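-- pv_equiv track=rewrite | github.com/ViacheslavBoltukhov/- | 2023/Тренировочная работа №4/Вариант 1/27B.py | d2
-- ===== SOURCE A (Python) =====
-- def d2(n):
--     k=0
--     while n%2==0:
--         k+=1
--         n//=2
--         if k>7:
--             return 8
--     return k
-- ===== SOURCE B (Python) =====
-- # O(1) table lookup: the answer is min(8, trailing zeros of n), capped at 8,
-- # so it depends on n only through n % 256 (with 8 for n % 256 == 0, incl. n == 0).
-- _TABLE = [8] + [(r & -r).bit_length() - 1 for r in range(1, 256)]
--
-- def d2(n):
--     return _TABLE[n % 256]
-- ===== Notes on version B (the rewrite author's own statement) =====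
-- stated objective: alternative
-- what changed: Replaces the trial-division-by-2 loop with a 256-entry precomputed table (built once via a lowest-set-bit bit trick) indexed by n % 256, since the 8-capped trailing-zero count depends only on the low 8 bits.
import Mathlib
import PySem

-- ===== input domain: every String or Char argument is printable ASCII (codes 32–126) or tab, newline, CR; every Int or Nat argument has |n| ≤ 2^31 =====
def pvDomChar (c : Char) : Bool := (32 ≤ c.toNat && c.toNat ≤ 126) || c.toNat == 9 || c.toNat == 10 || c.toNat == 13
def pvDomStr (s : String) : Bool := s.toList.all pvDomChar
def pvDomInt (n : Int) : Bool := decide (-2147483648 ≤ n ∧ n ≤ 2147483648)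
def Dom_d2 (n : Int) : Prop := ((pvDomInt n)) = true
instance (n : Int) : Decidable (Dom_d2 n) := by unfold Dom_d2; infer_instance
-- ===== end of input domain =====

-- B replaces A's divide-by-2 loop with a precomputed 256-entry table indexed by n % 256 (alternative, same O(1) cost).

-- ===== PORT A =====
-- A's while loop: at most 8 iterations (the k>7 cap); fuel 8 is never exhausted,
-- so the fuel-0 branch is dead code.
def d2Aux : Nat → Int → Int → Int
  | fuel, n, k =>
    if PySem.Int.mod n 2 = 0 then
      -- k += 1; n //= 2; if k > 7: return 8
      if k + 1 > 7 then 8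
      else
        match fuel with
        | 0 => 8            -- unreachable with fuel = 8 and k starting at 0
        | f + 1 => d2Aux f (PySem.Int.floordiv n 2) (k + 1)
    else k

def d2 (n : Int) : Int := d2Aux 8 n 0

-- ===== PORT B =====
-- _TABLE = [8] + [(r & -r).bit_length() - 1 for r in range(1, 256)]
def pvTable : List Int :=
  [8] ++ (PySem.List.pyRange 1 256 1).map
    (fun r => (PySem.Int.bitLength (PySem.Int.band r (-r)) : Int) - 1)

-- return _TABLE[n % 256]   (index is always in range 0..255, so getD 0 never fires)
def d2_alt (n : Int) : Int :=
  (PySem.List.pyGet? pvTable (PySem.Int.mod n 256)).getD 0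

-- ===== PRECONDITION & SPEC =====
def Spec_d2 (n : Int) (out : Int) : Prop := out = d2_alt n
instance (n : Int) (out : Int) : Decidable (Spec_d2 n out) := by unfold Spec_d2; infer_instance

-- ===== CLAIM (what is proved, stated in full; the proofs are below) =====
def Claim_equal_d2 : Prop := ∀ (n : Int), Dom_d2 n → Spec_d2 n (d2 n)

-- ===== LEMMAS AND PROOFS =====

-- The loop with fuel f inspects only the low f+1 bits of n:
-- adding 2^(f+1) * q does not change the result.
theorem d2Aux_pow (f : Nat) : ∀ (q r k : Int),
    d2Aux f (2 ^ (f + 1) * q + r) k = d2Aux f r k := by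
  induction f with
  | zero =>
    intro q r k
    have hm : PySem.Int.mod (2 ^ (0 + 1) * q + r) 2 = PySem.Int.mod r 2 := by
      rw [PySem.Int.mod_eq_emod_of_pos (by norm_num), PySem.Int.mod_eq_emod_of_pos (by norm_num)]
      omega
    simp only [d2Aux, hm]
  | succ f ih =>
    intro q r k
    have hm : PySem.Int.mod (2 ^ (f + 1 + 1) * q + r) 2 = PySem.Int.mod r 2 := by
      rw [PySem.Int.mod_eq_emod_of_pos (by norm_num), PySem.Int.mod_eq_emod_of_pos (by norm_num)]
      have : (2:Int) ^ (f + 1 + 1) * q = 2 * (2 ^ (f + 1) * q) := by ring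
      rw [this]; omega
    by_cases he : PySem.Int.mod r 2 = 0
    · have hre : r % 2 = 0 := by
        rwa [PySem.Int.mod_eq_emod_of_pos (by norm_num)] at he
      have hdiv : PySem.Int.floordiv (2 ^ (f + 1 + 1) * q + r) 2
          = 2 ^ (f + 1) * q + PySem.Int.floordiv r 2 := by
        rw [PySem.Int.floordiv_eq_ediv_of_pos (by norm_num),
            PySem.Int.floordiv_eq_ediv_of_pos (by norm_num)]
        have : (2:Int) ^ (f + 1 + 1) * q = 2 * (2 ^ (f + 1) * q) := by ring
        rw [this]; omega
      simp only [d2Aux, hm, he, hdiv]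
      split_ifs <;> first
        | rfl
        | exact ih q (PySem.Int.floordiv r 2) (k + 1)
    · simp only [d2Aux, hm, if_neg he]

-- Reduce A's result to the low 9 bits.
theorem d2_mod512 (n : Int) : d2 n = d2 (n % 512) := by
  have h : n = 2 ^ (8 + 1) * (n / 512) + n % 512 := by
    have := Int.mul_ediv_add_emod n 512
    push_cast; omega
  calc d2 n = d2Aux 8 (2 ^ (8 + 1) * (n / 512) + n % 512) 0 := by rw [d2, ← h]
    _ = d2Aux 8 (n % 512) 0 := d2Aux_pow 8 (n / 512) (n % 512) 0
    _ = d2 (n % 512) := rfl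

-- B also depends on n only through n % 512 (indeed n % 256).
theorem d2_alt_mod512 (n : Int) : d2_alt n = d2_alt (n % 512) := by
  unfold d2_alt
  have h : PySem.Int.mod n 256 = PySem.Int.mod (n % 512) 256 := by
    rw [PySem.Int.mod_eq_emod_of_pos (by norm_num), PySem.Int.mod_eq_emod_of_pos (by norm_num)]
    omega
  rw [h]

-- The two programs agree on every residue 0..511 (kernel evaluation).
set_option maxRecDepth 40000 in
theorem base_cases : ∀ r : Nat, r < 512 → d2 (r : Int) = d2_alt (r : Int) := by decide

-- ===== VERDICT (by name: the statement is the Claim_ definition above) =====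
theorem d2_spec : Claim_equal_d2 := by
  intro n _
  unfold Spec_d2
  rw [d2_mod512 n, d2_alt_mod512 n]
  have h0 : 0 ≤ n % 512 := Int.emod_nonneg n (by norm_num)
  have h1 : n % 512 < 512 := Int.emod_lt_of_pos n (by norm_num)
  have hc : ((n % 512).toNat : Int) = n % 512 := Int.toNat_of_nonneg h0
  rw [← hc]
  exact base_cases (n % 512).toNat (by omega)
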